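-- pv_equiv track=rewrite | github.com/gitpk-0/CodeWars | 7_kyu/Python/maskify.py | maskify2
-- ===== SOURCE A (Python) =====
-- def maskify2(cc):
--     if len(cc) > 4:
--         mask = ""
--         last_4 = cc[-4:]
--         for num in range(0, len(cc)-4):
--             mask += "#"
--         return mask + last_4
--     else:
--         return cc
-- ===== SOURCE B (Python) =====
-- def maskify2(cc):
--     return "#" * (len(cc) - 4) + cc[-4:]
-- ===== Notes on version B (the rewrite author's own statement) =====
-- stated objective: simpler
-- what changed: Replaces the if/else guard plus character-by-character mask-accumulation loop with a single closed-form expression: mask-character repetition of length len(cc)-4 concatenated with cc[-4:].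
import Mathlib
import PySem

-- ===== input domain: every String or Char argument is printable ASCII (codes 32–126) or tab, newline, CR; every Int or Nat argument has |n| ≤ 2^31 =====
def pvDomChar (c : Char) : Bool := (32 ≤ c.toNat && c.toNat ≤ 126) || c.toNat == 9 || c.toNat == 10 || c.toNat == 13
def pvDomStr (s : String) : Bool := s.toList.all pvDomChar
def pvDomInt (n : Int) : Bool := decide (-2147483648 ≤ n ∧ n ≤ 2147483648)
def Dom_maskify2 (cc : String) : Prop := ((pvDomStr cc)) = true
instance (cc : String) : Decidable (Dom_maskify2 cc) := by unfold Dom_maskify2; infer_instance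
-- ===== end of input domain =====

-- B replaces A's if/else guard and character-append loop with one closed-form
-- expression '#'*(len-4) + cc[-4:]; objective: simpler.

-- ===== PORT A =====
def maskify2 (cc : String) : String :=
  if PySem.Str.len cc > 4 then
    let last4 := PySem.List.slice cc.toList (some (-4)) none
    let mask := (PySem.List.pyRange 0 (PySem.Str.len cc - 4) 1).foldl
      (fun m _ => m ++ ['#']) ([] : List Char)
    String.ofList (mask ++ last4)
  else cc

-- ===== PORT B =====
def maskify2_alt (cc : String) : String :=
  String.ofList (PySem.List.pyRepeat ['#'] (PySem.Str.len cc - 4)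
    ++ PySem.List.slice cc.toList (some (-4)) none)

-- ===== PRECONDITION & SPEC =====
def Spec_maskify2 (cc : String) (out : String) : Prop := out = maskify2_alt cc
instance (cc : String) (out : String) : Decidable (Spec_maskify2 cc out) := by unfold Spec_maskify2; infer_instance

-- ===== CLAIM (what is proved, stated in full; the proofs are below) =====
def Claim_equal_maskify2 : Prop := ∀ (cc : String), Dom_maskify2 cc → Spec_maskify2 cc (maskify2 cc)

-- ===== LEMMAS AND PROOFS =====

-- ===== VERDICT (by name: the statement is the Claim_ definition above) =====
theorem maskify2_spec : Claim_equal_maskify2 := by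
  intro cc _
  unfold Spec_maskify2 maskify2 maskify2_alt
  rw [PySem.List.pyRepeat_singleton]
  rw [PySem.List.slice_from_neg_ofNat cc.toList 4 (by omega)]
  rw [PySem.Str.len_eq]
  by_cases h : (cc.toList.length : Int) > 4
  · simp only [h, if_true]
    have h4 : ((cc.toList.length : Int) - 4) = ((cc.toList.length - 4 : Nat) : Int) := by omega
    rw [h4, PySem.List.foldl_append_singleton_eq_map]
    simp [pysem]
  · simp only [h, if_false]
    have h1 : ((cc.toList.length : Int) - 4).toNat = 0 := by omega
    have h2 : cc.toList.length - 4 = 0 := by omega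
    rw [h1, h2]
    simp [String.ofList_toList]
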